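-- pv_equiv track=rewrite | github.com/adestefa/satori-tm-legal-system | monkey/core/summons_generator.py | _convert_template_format
-- ===== SOURCE A (Python) =====
-- def _convert_template_format(template_content: str) -> str:
--     """
--     Convert template from [variable] format to {{ variable }} Jinja2 format.
--
--     Args:
--         template_content: Raw template content
--
--     Returns:
--         Converted template content for Jinja2
--     """
--     # Template variable mappings
--     conversions = {
--         '[Eastern District of New York]': '{{ court_district }}',
--         '[Eman Youssef]': '{{ plaintiff_name }}',
--         '[TD Bank, NA, Equifax Information Services, LLC; <br>\n                                Experian Information Solutions, Inc and Trans Union, LLC]': '{{ all_defendants_html }}',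
--         '[1:25-cv-01987]': '{{ case_number }}',
--         '[Defendant Name]': '{{ defendant_name }}',
--         '[Defendant Address Line 1]': '{{ defendant_address_line1 }}',
--         '[Defendant City, State, ZIP]': '{{ defendant_address_city_state_zip }}',
--         '[Kevin Mallon]': '{{ attorney_name }}',
--         '[Mallon Consumer Law Group, PLLC]': '{{ firm_name }}',
--         '[238 Merritt Drive]': '{{ firm_address_line1 }}',
--         '[Oradell NJ 07649]': '{{ firm_address_city_state_zip }}',
--         '[(917) 734-6815]': '{{ firm_phone }}',
--         '[kmallon@consumerprotectionfirm.com]': '{{ firm_email }}',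
--         '[BRENNA B. MAHONEY]': '{{ clerk_name }}',
--         '[Date]': '{{ service_date }}'
--     }
--
--     # Apply conversions
--     for old_format, new_format in conversions.items():
--         template_content = template_content.replace(old_format, new_format)
--
--     return template_content
-- ===== SOURCE B (Python) =====
-- def _convert_template_format(template_content: str) -> str:
--     """
--     Convert template from [variable] format to {{ variable }} Jinja2 format,
--     in a single left-to-right pass over the string.  The placeholder table is
--     kept as bare (literal, variable) name pairs and the bracketed/braced forms
--     are generated; every placeholder starts with '[' and none overlaps another,
--     so one scan gives the same result as fifteen sequential str.replace passes.
--     """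
--     pairs = [
--         ("Eastern District of New York", "court_district"),
--         ("Eman Youssef", "plaintiff_name"),
--         ("TD Bank, NA, Equifax Information Services, LLC; <br>\n                                Experian Information Solutions, Inc and Trans Union, LLC", "all_defendants_html"),
--         ("1:25-cv-01987", "case_number"),
--         ("Defendant Name", "defendant_name"),
--         ("Defendant Address Line 1", "defendant_address_line1"),
--         ("Defendant City, State, ZIP", "defendant_address_city_state_zip"),
--         ("Kevin Mallon", "attorney_name"),
--         ("Mallon Consumer Law Group, PLLC", "firm_name"),
--         ("238 Merritt Drive", "firm_address_line1"),
--         ("Oradell NJ 07649", "firm_address_city_state_zip"),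
--         ("(917) 734-6815", "firm_phone"),
--         ("kmallon@consumerprotectionfirm.com", "firm_email"),
--         ("BRENNA B. MAHONEY", "clerk_name"),
--         ("Date", "service_date"),
--     ]
--     items = [("[" + k + "]", "{{ " + v + " }}") for k, v in pairs]
--     out = []
--     i = 0
--     n = len(template_content)
--     while i < n:
--         c = template_content[i]
--         if c == '[':
--             for old, new in items:
--                 if template_content.startswith(old, i):
--                     out.append(new)
--                     i += len(old)
--                     break
--             else:
--                 out.append(c)
--                 i += 1
--         else:
--             out.append(c)
--             i += 1
--     return ''.join(out)
-- ===== Notes on version B (the rewrite author's own statement) =====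
-- stated objective: alternative
-- what changed: B keeps the table as bare (literal, variable) name pairs from which it generates the bracketed placeholder and double-braced Jinja2 forms, and makes a single left-to-right scan that tries the placeholders in table order at each opening bracket and copies everything else, instead of A's fifteen sequential full-string str.replace passes; since no placeholder overlaps another and no replacement text contains an opening bracket, the results coincide.
import Mathlib
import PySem

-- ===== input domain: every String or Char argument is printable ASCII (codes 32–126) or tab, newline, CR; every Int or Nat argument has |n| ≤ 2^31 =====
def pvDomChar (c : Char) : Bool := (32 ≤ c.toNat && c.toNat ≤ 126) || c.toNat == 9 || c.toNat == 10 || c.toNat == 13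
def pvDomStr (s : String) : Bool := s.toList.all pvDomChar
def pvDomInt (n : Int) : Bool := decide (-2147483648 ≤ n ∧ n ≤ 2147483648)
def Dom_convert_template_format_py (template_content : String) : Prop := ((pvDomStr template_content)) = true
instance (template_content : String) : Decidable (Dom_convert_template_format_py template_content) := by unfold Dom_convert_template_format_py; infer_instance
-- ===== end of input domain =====

-- B replaces A's fifteen sequential full-string replace passes by one left-to-right scan
-- (over a table of bare names from which the bracketed/braced forms are generated)
-- that tries the placeholders in dict order at each '['; same return value (alternative decomposition).


-- ===== PORT A =====
-- the dict literal 'conversions' of Python A, as an association list in insertion order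
def pvConv : List (String × String) := [
  ("[Eastern District of New York]", "{{ court_district }}"),
  ("[Eman Youssef]", "{{ plaintiff_name }}"),
  ("[TD Bank, NA, Equifax Information Services, LLC; <br>\n                                Experian Information Solutions, Inc and Trans Union, LLC]", "{{ all_defendants_html }}"),
  ("[1:25-cv-01987]", "{{ case_number }}"),
  ("[Defendant Name]", "{{ defendant_name }}"),
  ("[Defendant Address Line 1]", "{{ defendant_address_line1 }}"),
  ("[Defendant City, State, ZIP]", "{{ defendant_address_city_state_zip }}"),
  ("[Kevin Mallon]", "{{ attorney_name }}"),
  ("[Mallon Consumer Law Group, PLLC]", "{{ firm_name }}"),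
  ("[238 Merritt Drive]", "{{ firm_address_line1 }}"),
  ("[Oradell NJ 07649]", "{{ firm_address_city_state_zip }}"),
  ("[(917) 734-6815]", "{{ firm_phone }}"),
  ("[kmallon@consumerprotectionfirm.com]", "{{ firm_email }}"),
  ("[BRENNA B. MAHONEY]", "{{ clerk_name }}"),
  ("[Date]", "{{ service_date }}")]

-- A: for old, new in conversions.items(): template_content = template_content.replace(old, new)
def convert_template_format_py (template_content : String) : String :=
  pvConv.foldl (fun acc kv => PySem.Str.replace acc kv.1 kv.2) template_content

-- ===== PORT B =====
-- B's 'pairs': bare (literal, variable) names in the same order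
def pvPairs : List (String × String) := [
  ("Eastern District of New York", "court_district"),
  ("Eman Youssef", "plaintiff_name"),
  ("TD Bank, NA, Equifax Information Services, LLC; <br>\n                                Experian Information Solutions, Inc and Trans Union, LLC", "all_defendants_html"),
  ("1:25-cv-01987", "case_number"),
  ("Defendant Name", "defendant_name"),
  ("Defendant Address Line 1", "defendant_address_line1"),
  ("Defendant City, State, ZIP", "defendant_address_city_state_zip"),
  ("Kevin Mallon", "attorney_name"),
  ("Mallon Consumer Law Group, PLLC", "firm_name"),
  ("238 Merritt Drive", "firm_address_line1"),
  ("Oradell NJ 07649", "firm_address_city_state_zip"),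
  ("(917) 734-6815", "firm_phone"),
  ("kmallon@consumerprotectionfirm.com", "firm_email"),
  ("BRENNA B. MAHONEY", "clerk_name"),
  ("Date", "service_date")]

-- B's 'items': ("[" + k + "]", "{{ " + v + " }}"), as character lists (B works character-wise)
def pvConvC : List (List Char × List Char) :=
  pvPairs.map fun kv =>
    ('[' :: (kv.1.toList ++ [']']), '{' :: '{' :: ' ' :: (kv.2.toList ++ [' ', '}', '}']))

-- the inner 'for old, new in items: if template_content.startswith(old, i): … break / else: …'
def pvFirstMatch (ps : List (List Char × List Char)) (s : List Char) : Option (List Char × List Char) :=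
  ps.find? fun kv => kv.1.isPrefixOf s

-- the 'while i < n' loop of B: one pass, copying chars, substituting at a match.
-- 't.drop (kv.1.length - 1)' is '(c :: t).drop kv.1.length' for the nonempty keys of pvConvC;
-- phrased on t only so that the recursion visibly terminates (a totality guard, not an algorithm change).
def pvScan (ps : List (List Char × List Char)) : List Char → List Char
  | [] => []
  | c :: t =>
    if c = '[' then
      match pvFirstMatch ps (c :: t) with
      | some kv => kv.2 ++ pvScan ps (t.drop (kv.1.length - 1))
      | none => c :: pvScan ps t
    else c :: pvScan ps t
termination_by l => l.length
decreasing_by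
  · simp only [List.length_cons, List.length_drop]; omega
  · simp
  · simp

def convert_template_format_py_alt (template_content : String) : String :=
  String.ofList (pvScan pvConvC template_content.toList)

-- ===== PRECONDITION & SPEC =====
def Spec_convert_template_format_py (template_content : String) (out : String) : Prop := out = convert_template_format_py_alt template_content
instance (template_content : String) (out : String) : Decidable (Spec_convert_template_format_py template_content out) := by unfold Spec_convert_template_format_py; infer_instance

-- ===== CLAIM (what is proved, stated in full; the proofs are below) =====
def Claim_equal_convert_template_format_py : Prop := ∀ (template_content : String), Dom_convert_template_format_py template_content → Spec_convert_template_format_py template_content (convert_template_format_py template_content)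

-- ===== LEMMAS AND PROOFS =====

-- B's generated table is exactly A's table, character for character
set_option maxRecDepth 8192 in
lemma pvConvC_eq : pvConv.map (fun kv => (kv.1.toList, kv.2.toList)) = pvConvC := by
  decide

-- clean recursive form of Python's str.replace (for a nonempty pattern);
-- same totality phrasing of the drop as in pvScan
def pvRep (old new : List Char) : List Char → List Char
  | [] => []
  | c :: t =>
    if old.isPrefixOf (c :: t) then new ++ pvRep old new (t.drop (old.length - 1))
    else c :: pvRep old new t
termination_by l => l.length
decreasing_by
  · simp only [List.length_cons, List.length_drop]; omega
  · simp

-- the character-content facts about the concrete table that drive the equivalence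
def pvGoodK (k : List Char) : Prop := k.head? = some '[' ∧ '[' ∉ k.tail ∧ '{' ∉ k
def pvGoodV (v : List Char) : Prop := v.head? = some '{' ∧ '[' ∉ v
def pvGood (ps : List (List Char × List Char)) : Prop := ∀ kv ∈ ps, pvGoodK kv.1 ∧ pvGoodV kv.2

set_option maxRecDepth 8192 in
lemma pvGood_pvConvC : pvGood pvConvC := by
  unfold pvGood pvGoodK pvGoodV pvConvC pvPairs; decide

lemma pvRep_go (old new : List Char) (h : old ≠ []) :
    ∀ fuel s acc, s.length ≤ fuel →
      PySem.Chars.replace.go old new fuel s acc = acc.reverse ++ pvRep old new s := by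
  intro fuel
  induction fuel with
  | zero =>
    intro s acc hs
    have : s = [] := by cases s <;> simp_all
    subst this
    simp [PySem.Chars.replace.go, pvRep]
  | succ fuel ih =>
    intro s acc hs
    match s with
    | [] => simp [PySem.Chars.replace.go, pvRep]
    | c :: t =>
      obtain ⟨o0, otl, rfl⟩ : ∃ o0 otl, old = o0 :: otl := by
        cases old with
        | nil => exact absurd rfl h
        | cons a b => exact ⟨a, b, rfl⟩
      by_cases hp : (o0 :: otl).isPrefixOf (c :: t) = true
      · have hdrop : List.drop (o0 :: otl).length (c :: t) = t.drop ((o0 :: otl).length - 1) := by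
          simp
        have hlen : (t.drop ((o0 :: otl).length - 1)).length ≤ fuel := by
          simp only [List.length_drop]
          have := List.length_cons (a := c) (as := t) ▸ hs
          omega
        rw [PySem.Chars.replace.go]
        simp only [hp, if_true, hdrop]
        rw [ih _ _ hlen]
        rw [pvRep]
        simp [hp]
      · have hlen : t.length ≤ fuel := by
          have := List.length_cons (a := c) (as := t) ▸ hs
          omega
        rw [PySem.Chars.replace.go]
        simp only [hp]
        rw [ih _ _ hlen]
        rw [pvRep]
        simp [hp]

lemma pvReplace_eq (old new s : List Char) (h : old ≠ []) :
    PySem.Chars.replace s old new = pvRep old new s := by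
  unfold PySem.Chars.replace
  have : old.isEmpty = false := by cases old <;> simp_all
  rw [this]
  simpa using pvRep_go old new h s.length s [] le_rfl

-- no occurrence of old can start inside a '['-free block
lemma pvRep_skip (old new : List Char) (ho : old.head? = some '[') :
    ∀ a b, '[' ∉ a → pvRep old new (a ++ b) = a ++ pvRep old new b := by
  intro a
  induction a with
  | nil => simp
  | cons c a' ih =>
    intro b hb
    obtain ⟨otl, rfl⟩ : ∃ otl, old = '[' :: otl := by
      cases old with
      | nil => simp at ho
      | cons o0 otl =>
        simp only [List.head?_cons, Option.some.injEq] at ho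
        exact ⟨otl, by rw [ho]⟩
    have hc : c ≠ '[' := fun h => hb (h ▸ List.mem_cons_self ..)
    have hnp : (('[' : Char) :: otl).isPrefixOf (c :: (a' ++ b)) = false := by
      simp [List.isPrefixOf]
      intro h
      exact absurd h.symm hc
    rw [List.cons_append, pvRep, hnp]
    simp only [Bool.false_eq_true, if_false]
    rw [ih b (fun h => hb (List.mem_cons_of_mem _ h))]
    simp

-- a '{'-free prefix of the replaced string was already a prefix of the original
lemma pvRep_prefix_rev (old new : List Char) (hn : new.head? = some '{') :
    ∀ s p, '{' ∉ p → p <+: pvRep old new s → p <+: s := by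
  intro s
  induction s using pvRep.induct (old := old) with
  | case1 =>
    intro p hp h
    simpa [pvRep] using h
  | case2 c t hpre ih =>
    intro p hp h
    rw [pvRep, if_pos hpre] at h
    match p, h with
    | [], _ => exact List.nil_prefix
    | q :: p', h =>
      exfalso
      obtain ⟨ntl, rfl⟩ : ∃ ntl, new = '{' :: ntl := by
        cases new with
        | nil => simp at hn
        | cons n0 ntl => exact ⟨ntl, by simp_all⟩
      rw [List.cons_append] at h
      rcases List.prefix_cons_iff.mp h with h0 | ⟨t', ht', _⟩
      · simp at h0
      · cases ht'
        exact hp (List.mem_cons_self ..)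
  | case3 c t hpre ih =>
    intro p hp h
    rw [pvRep, if_neg hpre] at h
    rcases List.prefix_cons_iff.mp h with rfl | ⟨p', rfl, hp'⟩
    · exact List.nil_prefix
    · exact List.cons_prefix_cons.mpr ⟨rfl, ih p' (fun hm => hp (List.mem_cons_of_mem _ hm)) hp'⟩

-- the scan copies a '['-free block verbatim
lemma pvScan_inert (ps : List (List Char × List Char)) :
    ∀ v X, '[' ∉ v → pvScan ps (v ++ X) = v ++ pvScan ps X := by
  intro v
  induction v with
  | nil => simp
  | cons c v' ih =>
    intro X hv
    have hc : c ≠ '[' := fun h => hv (h ▸ List.mem_cons_self ..)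
    rw [List.cons_append, pvScan, if_neg hc]
    rw [ih X (fun h => hv (List.mem_cons_of_mem _ h))]
    simp

-- a placeholder matches at the front of the replaced string iff it matched there originally
lemma pvKey_prefix_iff (k k1 v1 : List Char) (hk : pvGoodK k) (hk1 : pvGoodK k1)
    (hv1 : pvGoodV v1) (t : List Char) :
    k.isPrefixOf ('[' :: pvRep k1 v1 t) = k.isPrefixOf ('[' :: t) := by
  obtain ⟨ktl, rfl⟩ : ∃ ktl, k = '[' :: ktl := by
    cases k with
    | nil => simp [pvGoodK] at hk
    | cons a b =>
      obtain ⟨h1, _, _⟩ := hk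
      simp only [List.head?_cons, Option.some.injEq] at h1
      exact ⟨b, by rw [h1]⟩
  obtain ⟨_, hktl, hkbr⟩ := hk
  have hbr' : '{' ∉ ktl := fun h => hkbr (List.mem_cons_of_mem _ h)
  simp only [List.isPrefixOf_cons₂_self]
  rw [Bool.eq_iff_iff, List.isPrefixOf_iff_prefix, List.isPrefixOf_iff_prefix]
  constructor
  · intro h
    exact pvRep_prefix_rev k1 v1 hv1.1 t ktl hbr' h
  · intro h
    obtain ⟨r, rfl⟩ := h
    rw [pvRep_skip k1 v1 hk1.1 ktl r (by simpa using hktl)]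
    exact List.prefix_append ktl _

-- replacing with k1/v1 first does not change which placeholder matches first
lemma pvFirstMatch_mod (ps : List (List Char × List Char)) (hG : pvGood ps)
    (k1 v1 : List Char) (hk1 : pvGoodK k1) (hv1 : pvGoodV v1) (t : List Char) :
    pvFirstMatch ps ('[' :: pvRep k1 v1 t) = pvFirstMatch ps ('[' :: t) := by
  induction ps with
  | nil => rfl
  | cons kv ps' ih =>
    have hkv := hG kv (List.mem_cons_self ..)
    have hG' : pvGood ps' := fun x hx => hG x (List.mem_cons_of_mem _ hx)
    unfold pvFirstMatch at *
    rw [List.find?_cons, List.find?_cons,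
      pvKey_prefix_iff kv.1 k1 v1 hkv.1 hk1 hv1 t]
    cases kv.1.isPrefixOf ('[' :: t) with
    | true => rfl
    | false => exact ih hG'

lemma pvScan_cons_ne (ps : List (List Char × List Char)) (c : Char) (t : List Char)
    (hc : c ≠ '[') : pvScan ps (c :: t) = c :: pvScan ps t := by
  rw [pvScan, if_neg hc]

lemma pvScan_bracket_some (ps : List (List Char × List Char)) (kv : List Char × List Char)
    (t : List Char) (h : pvFirstMatch ps ('[' :: t) = some kv) :
    pvScan ps ('[' :: t) = kv.2 ++ pvScan ps (t.drop (kv.1.length - 1)) := by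
  rw [pvScan, if_pos rfl, h]

lemma pvScan_bracket_none (ps : List (List Char × List Char)) (t : List Char)
    (h : pvFirstMatch ps ('[' :: t) = none) :
    pvScan ps ('[' :: t) = '[' :: pvScan ps t := by
  rw [pvScan, if_pos rfl, h]

-- main step: scanning after one replace pass = scanning with that pair put in front
lemma pvMain (k1 v1 : List Char) (ps : List (List Char × List Char))
    (hk1 : pvGoodK k1) (hv1 : pvGoodV v1) (hG : pvGood ps) :
    ∀ s, pvScan ps (pvRep k1 v1 s) = pvScan ((k1, v1) :: ps) s := by
  suffices H : ∀ n s, s.length ≤ n → pvScan ps (pvRep k1 v1 s) = pvScan ((k1, v1) :: ps) s by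
    intro s; exact H s.length s le_rfl
  intro n
  induction n with
  | zero =>
    intro s hs
    have : s = [] := by cases s <;> simp_all
    subst this
    simp [pvRep, pvScan]
  | succ n ih =>
    intro s hs
    match s with
    | [] => simp [pvRep, pvScan]
    | c :: t =>
      have hlt : t.length ≤ n := by simp at hs; omega
      obtain ⟨ktl1, hk1eq⟩ : ∃ ktl1, k1 = '[' :: ktl1 := by
        cases h1 : k1 with
        | nil => rw [h1] at hk1; simp [pvGoodK] at hk1
        | cons a b =>
          obtain ⟨hh, _, _⟩ := hk1
          rw [h1] at hh
          simp only [List.head?_cons, Option.some.injEq] at hh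
          exact ⟨b, by rw [hh]⟩
      by_cases hc : c = '['
      · subst hc
        by_cases hp : k1.isPrefixOf ('[' :: t) = true
        · -- k1 matches: both sides substitute v1 and continue after it
          have hfm : pvFirstMatch ((k1, v1) :: ps) ('[' :: t) = some (k1, v1) := by
            unfold pvFirstMatch
            rw [List.find?_cons]
            simp [hp]
          rw [pvRep, if_pos hp]
          rw [pvScan_inert ps v1 _ hv1.2]
          rw [ih (t.drop (k1.length - 1)) (by simp only [List.length_drop]; omega)]
          rw [pvScan_bracket_some _ _ _ hfm]
        · -- k1 does not match at this position
          have hfm : pvFirstMatch ((k1, v1) :: ps) ('[' :: t) = pvFirstMatch ps ('[' :: t) := by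
            unfold pvFirstMatch
            rw [List.find?_cons]
            cases hfp : k1.isPrefixOf ('[' :: t) with
            | true => exact absurd hfp hp
            | false => rfl
          rw [pvRep, if_neg (by simpa using hp)]
          cases hm : pvFirstMatch ps ('[' :: t) with
          | none =>
            rw [pvScan_bracket_none ps _ (by rw [pvFirstMatch_mod ps hG k1 v1 hk1 hv1 t]; exact hm)]
            rw [pvScan_bracket_none ((k1, v1) :: ps) t (by rw [hfm]; exact hm)]
            rw [ih t hlt]
          | some kv =>
            have hmem : kv ∈ ps := List.mem_of_find?_eq_some hm
            have hkv := hG kv hmem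
            have hpre : kv.1.isPrefixOf ('[' :: t) = true := by
              have := List.find?_some hm
              simpa using this
            obtain ⟨ktl, hkeq⟩ : ∃ ktl, kv.1 = '[' :: ktl := by
              cases h1 : kv.1 with
              | nil => rw [h1] at hkv; simp [pvGoodK] at hkv
              | cons a b =>
                obtain ⟨hh, _, _⟩ := hkv.1
                rw [h1] at hh
                simp only [List.head?_cons, Option.some.injEq] at hh
                exact ⟨b, by rw [hh]⟩
            have hktlpre : ktl <+: t := by
              rw [hkeq, List.isPrefixOf_iff_prefix] at hpre
              exact (List.cons_prefix_cons.mp hpre).2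
            obtain ⟨r, rfl⟩ := hktlpre
            have hktlbr : '[' ∉ ktl := by
              have := hkv.1.2.1
              rw [hkeq] at this
              simpa using this
            have hskip : pvRep k1 v1 (ktl ++ r) = ktl ++ pvRep k1 v1 r :=
              pvRep_skip k1 v1 hk1.1 ktl r hktlbr
            have hlen1 : kv.1.length - 1 = ktl.length := by rw [hkeq]; simp
            rw [pvScan_bracket_some ps kv _
              (by rw [pvFirstMatch_mod ps hG k1 v1 hk1 hv1 (ktl ++ r)]; exact hm)]
            rw [pvScan_bracket_some ((k1, v1) :: ps) kv (ktl ++ r) (by rw [hfm]; exact hm)]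
            rw [hskip, hlen1, List.drop_left, List.drop_left]
            rw [ih r (by simp at hlt; omega)]
      · -- ordinary character: copied by both sides
        have hp : k1.isPrefixOf (c :: t) = false := by
          rw [hk1eq]
          simp [List.isPrefixOf]
          intro h
          exact absurd h.symm hc
        rw [pvRep, if_neg (by simp [hp])]
        rw [pvScan_cons_ne ps c _ hc, pvScan_cons_ne ((k1, v1) :: ps) c t hc]
        rw [ih t hlt]

lemma pvScan_nil : ∀ s, pvScan [] s = s := by
  intro s
  induction s with
  | nil => simp [pvScan]
  | cons c t ih =>
    rw [pvScan]
    by_cases hc : c = '['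
    · simp [hc, pvFirstMatch, ih]
    · simp [hc, ih]

lemma pvSeq (ps : List (List Char × List Char)) (hG : pvGood ps) :
    ∀ s, ps.foldl (fun acc kv => PySem.Chars.replace acc kv.1 kv.2) s = pvScan ps s := by
  induction ps with
  | nil => intro s; simp [pvScan_nil]
  | cons kv ps' ih =>
    intro s
    have hkv := hG kv (List.mem_cons_self ..)
    have hG' : pvGood ps' := fun x hx => hG x (List.mem_cons_of_mem _ hx)
    have hne : kv.1 ≠ [] := by
      intro h
      have := hkv.1.1
      rw [h] at this
      simp at this
    rw [List.foldl_cons]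
    rw [show PySem.Chars.replace s kv.1 kv.2 = pvRep kv.1 kv.2 s from pvReplace_eq kv.1 kv.2 s hne]
    rw [ih hG' (pvRep kv.1 kv.2 s)]
    have := pvMain kv.1 kv.2 ps' hkv.1 hkv.2 hG' s
    rw [this]

lemma pvFoldl_toList (L : List (String × String)) :
    ∀ s : String,
      (L.foldl (fun acc kv => PySem.Str.replace acc kv.1 kv.2) s).toList
        = (L.map fun kv => (kv.1.toList, kv.2.toList)).foldl
            (fun acc kv => PySem.Chars.replace acc kv.1 kv.2) s.toList := by
  induction L with
  | nil => intro s; simp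
  | cons kv L' ih =>
    intro s
    rw [List.map_cons, List.foldl_cons, List.foldl_cons, ih, PySem.Str.toList_replace]

-- ===== VERDICT (by name: the statement is the Claim_ definition above) =====
theorem convert_template_format_py_spec : Claim_equal_convert_template_format_py := by
  intro tc _
  unfold Spec_convert_template_format_py convert_template_format_py convert_template_format_py_alt
  have h1 := pvFoldl_toList pvConv tc
  have h2 := pvSeq pvConvC pvGood_pvConvC tc.toList
  have : (pvConv.foldl (fun acc kv => PySem.Str.replace acc kv.1 kv.2) tc).toList
      = pvScan pvConvC tc.toList := by rw [h1, pvConvC_eq]; exact h2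
  rw [← this, String.ofList_toList]
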